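-- pv_equiv track=rewrite | github.com/Xusheng-Li/Text-Classification | Text Classification Based on Naive Bayes.py | get_text_features
-- ===== SOURCE A (Python) =====
-- def get_text_features(train_data_list, test_data_list, feature_words):
--     '''
--     根据特征词，将数据集中的句子转化为特征向量
--     '''
--     def text_features(text, feature_words):
--         text_words = set(text)
--         features = [1 if word in text_words else 0 for word in feature_words] # 形成特征向量
--         return features
--     train_feature_list = [text_features(text, feature_words) for text in train_data_list]
--     test_feature_list = [text_features(text, feature_words) for text in test_data_list]
--     return train_feature_list, test_feature_list
-- ===== SOURCE B (Python) =====
-- def get_text_features(train_data_list, test_data_list, feature_words):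
--     # Build an index from each feature word to ALL of its column positions,
--     # then set 1s by looking up each distinct text word: O(len(text)) per text
--     # instead of scanning all feature words per text.
--     index = {}
--     for i, w in enumerate(feature_words):
--         index.setdefault(w, []).append(i)
--     n = len(feature_words)
--
--     def vectorize(text):
--         features = [0] * n
--         for w in set(text):
--             for p in index.get(w, []):
--                 features[p] = 1
--         return features
--
--     train_feature_list = [vectorize(text) for text in train_data_list]
--     test_feature_list = [vectorize(text) for text in test_data_list]
--     return train_feature_list, test_feature_list
-- ===== Notes on version B (the rewrite author's own statement) =====
-- stated objective: alternative
-- what changed: Instead of testing every feature word for membership in each text's word set, B builds once a dict mapping each feature word to all of its column positions, then for each text starts from a zero vector and sets 1 at the looked-up positions of each distinct text word.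
import Mathlib
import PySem

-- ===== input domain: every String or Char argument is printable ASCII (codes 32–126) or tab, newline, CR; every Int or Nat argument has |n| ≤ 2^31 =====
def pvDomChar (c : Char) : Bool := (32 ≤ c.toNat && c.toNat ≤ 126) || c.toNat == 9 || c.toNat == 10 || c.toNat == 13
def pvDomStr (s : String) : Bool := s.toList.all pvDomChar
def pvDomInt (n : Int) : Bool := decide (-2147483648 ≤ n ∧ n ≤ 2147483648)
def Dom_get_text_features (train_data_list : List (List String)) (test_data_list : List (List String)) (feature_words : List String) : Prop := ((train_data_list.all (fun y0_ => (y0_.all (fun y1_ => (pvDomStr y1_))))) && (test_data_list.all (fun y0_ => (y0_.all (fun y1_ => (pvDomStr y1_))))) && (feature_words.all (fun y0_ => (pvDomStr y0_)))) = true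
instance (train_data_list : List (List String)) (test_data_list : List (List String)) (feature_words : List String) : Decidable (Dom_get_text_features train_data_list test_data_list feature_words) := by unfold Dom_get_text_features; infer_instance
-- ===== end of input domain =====

-- B replaces A's per-text membership test over all feature words by a one-time dict from each
-- feature word to all its column positions, setting 1s from the text's distinct words (objective: alternative).

-- ===== PORT A =====
-- inner helper 'text_features' of A
def aTextFeatures (text : List String) (feature_words : List String) : List Int :=
  let text_words := PySem.Set.ofList text
  feature_words.map (fun word => if PySem.Set.contains text_words word then (1 : Int) else 0)

def get_text_features (train_data_list : List (List String)) (test_data_list : List (List String)) (feature_words : List String) : List (List Int) × List (List Int) :=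
  let train_feature_list := train_data_list.map (fun text => aTextFeatures text feature_words)
  let test_feature_list := test_data_list.map (fun text => aTextFeatures text feature_words)
  (train_feature_list, test_feature_list)

-- ===== PORT B =====
-- 'index.setdefault(w, []).append(i)' loop of B (= d[w] = d.get(w, []) + [i])
def bIndex (feature_words : List String) : PySem.Dict String (List Int) :=
  (PySem.List.enumerate feature_words).foldl
    (fun d p => d.modify p.2 [] (· ++ [p.1])) PySem.Dict.empty

-- B's 'vectorize': zero vector, then 1s at the positions of each distinct text word.
-- Python iterates set(text) in hash order; the result is order-independent (only 1s are
-- written at fixed positions), so folding the Set's list is exact.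
def bVectorize (idx : PySem.Dict String (List Int)) (n : Nat) (text : List String) : List Int :=
  (PySem.Set.ofList text).foldl
    (fun r w => (idx.getD w []).foldl (fun r p => PySem.List.pySetD r p 1) r)
    (List.replicate n 0)

def get_text_features_alt (train_data_list : List (List String)) (test_data_list : List (List String)) (feature_words : List String) : List (List Int) × List (List Int) :=
  let idx := bIndex feature_words
  let n := feature_words.length
  (train_data_list.map (fun text => bVectorize idx n text),
   test_data_list.map (fun text => bVectorize idx n text))

-- ===== PRECONDITION & SPEC =====
def Spec_get_text_features (train_data_list : List (List String)) (test_data_list : List (List String)) (feature_words : List String) (out : List (List Int) × List (List Int)) : Prop := out = get_text_features_alt train_data_list test_data_list feature_words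
instance (train_data_list : List (List String)) (test_data_list : List (List String)) (feature_words : List String) (out : List (List Int) × List (List Int)) : Decidable (Spec_get_text_features train_data_list test_data_list feature_words out) := by unfold Spec_get_text_features; infer_instance

-- ===== CLAIM (what is proved, stated in full; the proofs are below) =====
def Claim_equal_get_text_features : Prop := ∀ (train_data_list : List (List String)) (test_data_list : List (List String)) (feature_words : List String), Dom_get_text_features train_data_list test_data_list feature_words → Spec_get_text_features train_data_list test_data_list feature_words (get_text_features train_data_list test_data_list feature_words)

-- ===== LEMMAS AND PROOFS =====

theorem getD_bIndexAux (l : List (Int × String)) (d : PySem.Dict String (List Int)) (w : String) :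
    (l.foldl (fun d p => d.modify p.2 [] (· ++ [p.1])) d).getD w []
      = d.getD w [] ++ (l.filter (fun p => p.2 == w)).map (·.1) := by
  induction l generalizing d with
  | nil => simp
  | cons p l ih =>
    simp only [List.foldl_cons, ih, List.filter_cons]
    rw [PySem.Dict.getD_modify]
    by_cases h : p.2 = w
    · subst h; simp
    · rw [if_neg (fun hh => h hh.symm)]
      simp [h]

theorem mem_bIndex (fw : List String) (w : String) (j : Int) :
    j ∈ (bIndex fw).getD w [] ↔ ∃ (k : Nat), ∃ (h : k < fw.length), j = (k : Int) ∧ fw[k] = w := by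
  unfold bIndex
  rw [getD_bIndexAux]
  simp only [PySem.Dict.getD_empty, List.nil_append, List.mem_map, List.mem_filter]
  constructor
  · rintro ⟨p, ⟨hp, hw⟩, rfl⟩
    rw [PySem.List.mem_enumerate_iff] at hp
    obtain ⟨k, hk, rfl⟩ := hp
    refine ⟨k, hk, by simp, beq_iff_eq.mp hw⟩
  · rintro ⟨k, hk, rfl, hw⟩
    refine ⟨((k : Int), fw[k]), ⟨?_, beq_iff_eq.mpr hw⟩, rfl⟩
    rw [PySem.List.mem_enumerate_iff]
    refine ⟨k, hk, ?_⟩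
    simp

theorem inner_len (ps : List Int) (r : List Int) :
    (ps.foldl (fun r p => PySem.List.pySetD r p 1) r).length = r.length := by
  induction ps generalizing r with
  | nil => rfl
  | cons p ps ih => simp [ih, PySem.List.length_pySetD]

theorem inner_get (ps : List Int) (r : List Int)
    (hps : ∀ p ∈ ps, 0 ≤ p ∧ p < (r.length : Int)) (i : Nat) :
    (ps.foldl (fun r p => PySem.List.pySetD r p 1) r)[i]?
      = if (i : Int) ∈ ps then some 1 else r[i]? := by
  induction ps generalizing r with
  | nil => simp
  | cons p ps ih =>
    have hp := hps p (List.mem_cons_self ..)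
    have hlen : (PySem.List.pySetD r p 1).length = r.length := PySem.List.length_pySetD ..
    rw [List.foldl_cons, ih _ (fun q hq => hlen ▸ hps q (List.mem_cons_of_mem _ hq))]
    have hset : PySem.List.pySetD r p 1 = r.set p.toNat 1 := PySem.List.pySetD_of_nonneg r 1 hp.1
    rw [hset]
    by_cases hmem : (i : Int) ∈ ps
    · simp [hmem]
    · by_cases hpi : p = (i : Int)
      · have hi : p.toNat = i := by omega
        have hilen : i < r.length := by omega
        simp [hmem, hpi, hilen]
      · have hne : p.toNat ≠ i := by omega
        have hpi' : ¬ (i : Int) = p := fun h => hpi h.symm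
        simp [hmem, hpi', hne]

theorem outer_get (idx : PySem.Dict String (List Int)) (n : Nat)
    (hidx : ∀ (w : String) (p : Int), p ∈ idx.getD w [] → 0 ≤ p ∧ p < (n : Int))
    (ws : List String) (r : List Int) (hr : r.length = n) (i : Nat) :
    (ws.foldl (fun r w => (idx.getD w []).foldl (fun r p => PySem.List.pySetD r p 1) r) r)[i]?
      = if ∃ w ∈ ws, (i : Int) ∈ idx.getD w [] then some 1 else r[i]? := by
  induction ws generalizing r with
  | nil => simp
  | cons w ws ih =>
    rw [List.foldl_cons, ih _ (by rw [inner_len, hr])]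
    rw [inner_get _ _ (fun p hp => hr ▸ hidx w p hp)]
    by_cases h1 : ∃ w' ∈ ws, (i : Int) ∈ idx.getD w' []
    · simp [h1]
    · by_cases h2 : (i : Int) ∈ idx.getD w []
      · simp [h1, h2]
      · have : ¬ ∃ w' ∈ w :: ws, (i : Int) ∈ idx.getD w' [] := by
          rintro ⟨w', hw', hm⟩
          rcases List.mem_cons.mp hw' with rfl | hw'
          · exact h2 hm
          · exact h1 ⟨w', hw', hm⟩
        rw [if_neg h2, if_neg this, if_neg h1]

theorem vectorize_eq (fw : List String) (text : List String) :
    bVectorize (bIndex fw) fw.length text = aTextFeatures text fw := by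
  have hidx : ∀ (w : String) (p : Int), p ∈ (bIndex fw).getD w [] → 0 ≤ p ∧ p < (fw.length : Int) := by
    intro w p hp
    rw [mem_bIndex] at hp
    obtain ⟨k, hk, rfl, _⟩ := hp
    constructor <;> [exact Int.natCast_nonneg k; exact_mod_cast hk]
  apply List.ext_getElem?
  intro i
  unfold bVectorize aTextFeatures
  rw [outer_get _ _ hidx _ _ (List.length_replicate ..) i]
  simp only [List.getElem?_map]
  by_cases hi : i < fw.length
  · have hcond : (∃ w ∈ PySem.Set.ofList text, (i : Int) ∈ (bIndex fw).getD w [])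
        ↔ fw[i] ∈ text := by
      constructor
      · rintro ⟨w, hw, hm⟩
        rw [mem_bIndex] at hm
        obtain ⟨k, hk, hki, hfw⟩ := hm
        have hk' : k = i := by exact_mod_cast hki.symm
        subst hk'
        exact hfw ▸ (by simpa using hw)
      · intro h
        exact ⟨fw[i], by simpa using h, (mem_bIndex fw _ _).mpr ⟨i, hi, rfl, rfl⟩⟩
    by_cases hmem : fw[i] ∈ text
    · rw [if_pos (hcond.mpr hmem)]
      simp [List.getElem?_eq_getElem hi, hmem, PySem.Set.contains]
    · rw [if_neg (fun hc => hmem (hcond.mp hc))]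
      simp [hmem, PySem.Set.contains, hi]
  · have hnone : (fw[i]? = (none : Option String)) := List.getElem?_eq_none (by simpa using hi)
    have hnone2 : ((List.replicate fw.length (0:Int))[i]? = none) :=
      List.getElem?_eq_none (by simpa using hi)
    have hcond : ¬ ∃ w ∈ PySem.Set.ofList text, (i : Int) ∈ (bIndex fw).getD w [] := by
      rintro ⟨w, _, hm⟩
      have := (hidx w _ hm).2
      omega
    simp only [hnone, hnone2, Option.map_none]
    rw [if_neg (by simpa using hcond)]

-- ===== VERDICT (by name: the statement is the Claim_ definition above) =====
theorem get_text_features_spec : Claim_equal_get_text_features := by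
  intro train test fw _
  unfold Spec_get_text_features get_text_features get_text_features_alt
  simp only [vectorize_eq]
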